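-- pv_equiv track=rewrite | github.com/Fijuwat/CS-Projects | MockExam2.py | characterLastIndexDictionary
-- ===== SOURCE A (Python) =====
-- def characterLastIndexDictionary(string, index):
--
--     # replace pass with your solution to problem 7 here
--
--     index += 1
--     if len(string) < index:
--         return{}
--     answer = characterLastIndexDictionary(string, index)
--     answer[string[-index]] = len(string) - index
--     return answer
--
--
--
--
--     '''
--     if index == 0:
--         gg = {}
--         gg[string[index]] = index
--         gg.update(characterLastIndexDictionary(string, index+1))
--         return gg
--
--
--     if index > 0 and index < len(string):
--         #{string[index]:index}.update((characterLastIndexDictionary(string, index+1)))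
--         return {string[index]:index}
--
-- ----------------------------------
--
--         if index == 0:
--         gg = {string[index]:index}
--     if index > 0 and index < len(string):
--         return ({string[index]:index})
--
--     return gg.update(characterLastIndexDictionary(string, index+1))
--
--     if index < len(string):
--         if index == 0:
--             answer = {}
--         answer[string[index]] = index
--         return characterLastIndexDictionary(string.replace(string[index],"",1), index + 1)
--
--     return answer
--
--     '''
-- ===== SOURCE B (Python) =====
-- def characterLastIndexDictionary(string, index):
--     # front-to-back dict comprehension: entry j maps string[j] to j,
--     # later duplicates overwrite, exactly as A's unwinding recursion does
--     return {string[j]: j for j in range(len(string) - index)}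
-- ===== Notes on version B (the rewrite author's own statement) =====
-- stated objective: simpler
-- what changed: Replaced A's back-to-front recursion (negative indexing string[-k], unwinding depth len(string)-index) by a single front-to-back dict comprehension {string[j]: j for j in range(len(string)-index)}.
-- outside the precondition, e.g. on characterLastIndexDictionary('ab', -1): A returns {'a': 2, 'b': 1}, B raises IndexError; on characterLastIndexDictionary('ab', -3): A raises IndexError, B raises IndexError
import Mathlib
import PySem

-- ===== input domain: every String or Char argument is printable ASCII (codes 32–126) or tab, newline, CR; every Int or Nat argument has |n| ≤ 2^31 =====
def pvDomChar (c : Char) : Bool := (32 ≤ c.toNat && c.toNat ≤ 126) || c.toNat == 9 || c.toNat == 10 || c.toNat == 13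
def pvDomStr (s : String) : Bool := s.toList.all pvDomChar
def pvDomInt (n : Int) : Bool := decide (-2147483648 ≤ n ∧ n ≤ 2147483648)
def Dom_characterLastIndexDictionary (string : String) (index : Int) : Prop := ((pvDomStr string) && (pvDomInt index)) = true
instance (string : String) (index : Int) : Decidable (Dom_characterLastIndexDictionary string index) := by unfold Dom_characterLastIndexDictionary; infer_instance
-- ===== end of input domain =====

-- B replaces A's back-to-front recursion (string[-k] keys, unwinding stack) by a single
-- front-to-back dict comprehension over range(len(string) - index); objective: simpler.


-- ===== PORT A =====
-- A's recursion: index += 1; if len < index return {}; answer = rec(string, index);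
-- answer[string[-index]] = len - index.  (pyGet? = string[-index]; .getD ' ' is only
-- reached where Python raises IndexError, which Pre_ excludes.)
def pvAuxA (s : List Char) (index : Int) : PySem.Dict String Int :=
  let index' := index + 1
  if (s.length : Int) < index' then PySem.Dict.empty
  else
    let answer := pvAuxA s index'
    answer.insert (String.ofList [(PySem.List.pyGet? s (-index')).getD ' ']) ((s.length : Int) - index')
termination_by ((s.length : Int) + 1 - index).toNat
decreasing_by omega

def characterLastIndexDictionary (string : String) (index : Int) : List (String × Int) :=
  (pvAuxA string.toList index).items

-- ===== PORT B =====
-- {string[j]: j for j in range(len(string) - index)}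
def characterLastIndexDictionary_alt (string : String) (index : Int) : List (String × Int) :=
  ((PySem.List.pyRange 0 ((string.toList.length : Int) - index) 1).foldl
    (fun d j => d.insert (String.ofList [(PySem.List.pyGet? string.toList j).getD ' ']) j)
    PySem.Dict.empty).items

-- ===== PRECONDITION & SPEC =====
-- Pre_ excludes index < 0: for index < -len(string) A raises IndexError, and for
-- -len ≤ index < 0 A returns extra wraparound entries (string[-k] with k ≤ 0) where
-- B's natural comprehension itself raises IndexError.
def Pre_characterLastIndexDictionary (string : String) (index : Int) : Prop := 0 ≤ index
instance (string : String) (index : Int) : Decidable (Pre_characterLastIndexDictionary string index) := by unfold Pre_characterLastIndexDictionary; infer_instance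

def pvWitness_characterLastIndexDictionary : String × Int := ("abcab", 1)

def Spec_characterLastIndexDictionary (string : String) (index : Int) (out : List (String × Int)) : Prop := out = characterLastIndexDictionary_alt string index
instance (string : String) (index : Int) (out : List (String × Int)) : Decidable (Spec_characterLastIndexDictionary string index out) := by unfold Spec_characterLastIndexDictionary; infer_instance

-- ===== CLAIM (what is proved, stated in full; the proofs are below) =====
def Claim_equal_characterLastIndexDictionary : Prop := ∀ (string : String) (index : Int), Dom_characterLastIndexDictionary string index → Pre_characterLastIndexDictionary string index → Spec_characterLastIndexDictionary string index (characterLastIndexDictionary string index)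

-- ===== LEMMAS AND PROOFS =====

-- unwinding A's recursion front-to-back yields exactly B's left fold over range(0, len - i)
lemma pvAuxA_eq_foldl (s : List Char) :
    ∀ (n : Nat) (i : Int), 0 ≤ i → (s.length : Int) - i ≤ n →
      pvAuxA s i =
        (PySem.List.pyRange 0 ((s.length : Int) - i) 1).foldl
          (fun d j => d.insert (String.ofList [(PySem.List.pyGet? s j).getD ' ']) j)
          PySem.Dict.empty := by
  intro n
  induction n with
  | zero =>
      intro i hi hle
      rw [pvAuxA]
      rw [if_pos (by omega), PySem.List.pyRange_one_eq_nil (by omega)]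
      rfl
  | succ n ih =>
      intro i hi hle
      rw [pvAuxA]
      by_cases h : (s.length : Int) < i + 1
      · rw [if_pos h, PySem.List.pyRange_one_eq_nil (by omega)]
        rfl
      · rw [if_neg h]
        have hrange : PySem.List.pyRange 0 ((s.length : Int) - i) 1
            = PySem.List.pyRange 0 ((s.length : Int) - (i+1)) 1 ++ [(s.length : Int) - (i+1)] := by
          have : (s.length : Int) - i = ((s.length : Int) - (i+1)) + 1 := by omega
          rw [this, PySem.List.pyRange_one_succ_right (by omega)]
        rw [hrange, List.foldl_append, ← ih (i+1) (by omega) (by omega)]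
        simp only [List.foldl]
        -- keys agree: s[-(i+1)] = s[len-(i+1)] for 1 ≤ i+1 ≤ len
        have hkey : PySem.List.pyGet? s (-(i+1)) = PySem.List.pyGet? s ((s.length : Int) - (i+1)) := by
          have hk : (i+1) = ((i+1).toNat : Int) := by omega
          rw [hk, PySem.List.pyGet?_neg_natCast s (i+1).toNat (by omega) (by omega),
            PySem.List.pyGet?_of_nonneg s (by omega)]
          congr 1
          omega
        rw [hkey]

-- ===== VERDICT (by name: the statement is the Claim_ definition above) =====
theorem characterLastIndexDictionary_spec : Claim_equal_characterLastIndexDictionary := by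
  intro string index _ hpre
  unfold Spec_characterLastIndexDictionary characterLastIndexDictionary characterLastIndexDictionary_alt
  rw [pvAuxA_eq_foldl string.toList ((string.toList.length : Int) - index).toNat index hpre (by omega)]
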